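-- pv_equiv track=rewrite | github.com/adamnovak/gwhatshap | whatshap/scs.py | findOverlappingPair
-- ===== SOURCE A (Python) =====
-- def findOverlappingPair(str1, str2, str):
-- 	max = -1
-- 	len1 = len(str1)
-- 	len2 = len(str2)
--
-- 	for i in range(1, min(len1, len2)+1):
-- 		if str1[len1-i:] == str2[:i]:
-- 			if max < i:
-- 				max = i
-- 				str.clear()
-- 				str.extend(str1 + str2[i:])
--
-- 	for i in range(1, min(len1, len2)+1):
-- 		if str1[:i] == str2[len2-i:]:
-- 			if max < i:
-- 				max = i
-- 				str.clear()
-- 				str.extend(str2 + str1[i:])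
--
-- 	return max
-- ===== SOURCE B (Python) =====
-- def findOverlappingPair(str1, str2, str):
-- 	# One left-to-right pass per orientation, simulating the pattern-matching NFA:
-- 	# maintain the set of partial-match lengths k such that the last k items seen
-- 	# equal b[:k]; no slice comparisons, no loop over candidate overlap lengths.
-- 	def overlap(a, b):
-- 		if not b:
-- 			return 0
-- 		b0 = b[0]
-- 		cands = []
-- 		for c in a:
-- 			nxt = [k + 1 for k in cands if k < len(b) and b[k] == c]
-- 			if b0 == c:
-- 				nxt.append(1)
-- 			cands = nxt
-- 		return max(cands, default=0)
--
-- 	ov1 = overlap(str1, str2)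
-- 	ov2 = overlap(str2, str1)
-- 	if ov2 > ov1:
-- 		str[:] = str2 + str1[ov2:]
-- 		return ov2
-- 	if ov1 > 0:
-- 		str[:] = str1 + str2[ov1:]
-- 		return ov1
-- 	return -1
-- ===== Notes on version B (the rewrite author's own statement) =====
-- stated objective: alternative
-- what changed: A tries every candidate overlap length in each orientation and compares a suffix slice with a prefix slice for each; B never slices: it makes one left-to-right pass over the text per orientation, simulating the pattern-matching NFA by maintaining the set of partial-match lengths k with text[-k:] == pattern[:k], and reads the overlap off the surviving candidates at the end.
import Mathlib
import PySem

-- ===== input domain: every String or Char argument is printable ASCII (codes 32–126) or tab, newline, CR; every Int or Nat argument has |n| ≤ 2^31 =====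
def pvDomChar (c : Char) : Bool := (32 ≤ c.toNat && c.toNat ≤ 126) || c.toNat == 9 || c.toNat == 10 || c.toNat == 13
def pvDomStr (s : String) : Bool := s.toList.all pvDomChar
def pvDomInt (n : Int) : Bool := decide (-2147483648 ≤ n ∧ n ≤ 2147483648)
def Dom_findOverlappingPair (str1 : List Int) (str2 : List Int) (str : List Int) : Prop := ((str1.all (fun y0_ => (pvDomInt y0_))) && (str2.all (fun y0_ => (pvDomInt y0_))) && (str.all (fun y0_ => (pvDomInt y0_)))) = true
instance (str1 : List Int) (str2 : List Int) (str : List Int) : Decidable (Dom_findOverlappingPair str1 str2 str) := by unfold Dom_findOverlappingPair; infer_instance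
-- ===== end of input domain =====

-- B replaces A's slice-comparing scans over every candidate overlap length by one left-to-right
-- NFA-simulation pass per orientation that maintains the live partial-match lengths
-- ("alternative"; same worst-case cost class).
-- A mutates its `str` argument in place (clear/extend); the equivalence proved here is about the
-- RETURN value only (Python B performs the same mutation; the ports return only the Int).

-- ===== PORT A =====
-- str.clear()/str.extend(...) do not affect the returned value, so the port carries only `max`.
def findOverlappingPair (str1 : List Int) (str2 : List Int) (str : List Int) : Int :=
  let len1 : Int := str1.length
  let len2 : Int := str2.length
  let max1 : Int :=
    (PySem.List.pyRange 1 (min len1 len2 + 1) 1).foldl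
      (fun mx i =>
        if PySem.List.slice str1 (some (len1 - i)) none == PySem.List.slice str2 none (some i) then
          (if mx < i then i else mx) else mx) (-1)
  (PySem.List.pyRange 1 (min len1 len2 + 1) 1).foldl
    (fun mx i =>
      if PySem.List.slice str2 (some (len2 - i)) none == PySem.List.slice str1 none (some i) then
        (if mx < i then i else mx) else mx) max1

-- ===== PORT B =====
-- one step of the pass over `a`: keep every partial-match length that `c` extends, and start a
-- new length-1 match when `c` equals b[0] (pvOverlap only calls this with b ≠ [])
def pvStep (b : List Int) (cands : List Nat) (c : Int) : List Nat :=
  (cands.filterMap fun k => if k < b.length ∧ b.getD k 0 = c then some (k + 1) else none)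
  ++ (if b.headD 0 = c ∧ b ≠ [] then [1] else [])

def pvOverlap (a : List Int) (b : List Int) : Nat :=
  if b = [] then 0
  else PySem.List.maxD (a.foldl (pvStep b) []) (fun k => k) 0   -- max(cands, default=0)

def findOverlappingPair_alt (str1 : List Int) (str2 : List Int) (str : List Int) : Int :=
  let ov1 := pvOverlap str1 str2
  let ov2 := pvOverlap str2 str1
  if ov2 > ov1 then (ov2 : Int)
  else if ov1 > 0 then (ov1 : Int)
  else -1

-- ===== PRECONDITION & SPEC =====
def Spec_findOverlappingPair (str1 : List Int) (str2 : List Int) (str : List Int) (out : Int) : Prop := out = findOverlappingPair_alt str1 str2 str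
instance (str1 : List Int) (str2 : List Int) (str : List Int) (out : Int) : Decidable (Spec_findOverlappingPair str1 str2 str out) := by unfold Spec_findOverlappingPair; infer_instance

-- ===== CLAIM (what is proved, stated in full; the proofs are below) =====
def Claim_equal_findOverlappingPair : Prop := ∀ (str1 : List Int) (str2 : List Int) (str : List Int), Dom_findOverlappingPair str1 str2 str → Spec_findOverlappingPair str1 str2 str (findOverlappingPair str1 str2 str)

-- ===== LEMMAS AND PROOFS =====

-- proof-side bridge: "largest i ≤ n with cond i, else 0", characterised as a downward scan
def pvDescend (cond : Int → Bool) : Nat → Nat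
  | 0 => 0
  | i+1 => if cond ((i+1 : Nat) : Int) then i+1 else pvDescend cond i

theorem pvDescend_le (cond : Int → Bool) (n : Nat) : pvDescend cond n ≤ n := by
  induction n with
  | zero => simp [pvDescend]
  | succ i ih => simp only [pvDescend]; split <;> omega

theorem pvDescend_cond (cond : Int → Bool) (n : Nat) :
    pvDescend cond n = 0 ∨ cond ((pvDescend cond n : Nat) : Int) = true := by
  induction n with
  | zero => simp [pvDescend]
  | succ i ih =>
    simp only [pvDescend]
    split
    · right; assumption
    · exact ih

theorem pvDescend_greatest (cond : Int → Bool) (n : Nat) :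
    ∀ j, pvDescend cond n < j → j ≤ n → cond ((j : Nat) : Int) = false := by
  induction n with
  | zero => intro j h1 h2; omega
  | succ i ih =>
    intro j h1 h2
    by_cases hc : cond ((i+1 : Nat) : Int)
    · simp only [pvDescend, if_pos hc] at h1
      exact absurd h2 (by omega)
    · simp only [pvDescend, if_neg hc] at h1
      rcases Nat.lt_or_ge j (i+1) with h | h
      · exact ih j h1 (by omega)
      · have hji : j = i + 1 := by omega
        subst hji
        simpa using hc

theorem le_pvDescend (cond : Int → Bool) (n : Nat) (j : Nat)
    (hj : 1 ≤ j) (hjn : j ≤ n) (hc : cond ((j : Nat) : Int) = true) :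
    j ≤ pvDescend cond n := by
  by_contra h
  have := pvDescend_greatest cond n j (by omega) hjn
  rw [this] at hc; exact Bool.noConfusion hc

-- the A-side fold equals the seed combined with the greatest satisfying index
theorem foldA_eq_descend (cond : Int → Bool) (n : Nat) (init : Int) :
    (PySem.List.pyRange 1 ((n : Int) + 1) 1).foldl
      (fun mx i => if cond i then (if mx < i then i else mx) else mx) init
    = if pvDescend cond n = 0 then init else max init ((pvDescend cond n : Nat) : Int) := by
  induction n generalizing init with
  | zero =>
    rw [PySem.List.pyRange_one_eq_nil (by omega)]
    simp [pvDescend]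
  | succ i ih =>
    have hcast : ((i + 1 : Nat) : Int) + 1 = ((i : Int) + 1) + 1 := by push_cast; ring
    rw [hcast, PySem.List.pyRange_one_succ_right (by omega), List.foldl_append]
    simp only [List.foldl_cons, List.foldl_nil, ih, pvDescend]
    push_cast
    have hle := pvDescend_le cond i
    by_cases hc : cond ((i : Int) + 1)
    · simp only [hc, if_true, max_def]
      split_ifs <;> first | exact (‹False›).elim | omega
    · simp [hc]

-- membership characterisation of B's candidate list: after the whole pass over a,
-- k is live iff the last k elements of a equal the first k of b
theorem mem_foldl_pvStep (b : List Int) (hb : b ≠ []) (a : List Int) : ∀ k : Nat,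
    k ∈ a.foldl (pvStep b) [] ↔
      1 ≤ k ∧ k ≤ a.length ∧ k ≤ b.length ∧ a.drop (a.length - k) = b.take k := by
  induction a using List.reverseRecOn with
  | nil =>
    intro k
    simp only [List.foldl_nil, List.not_mem_nil, List.length_nil, false_iff]
    rintro ⟨h1, h2, -⟩; omega
  | append_singleton a c ih =>
    intro k
    rw [List.foldl_append]
    simp only [List.foldl_cons, List.foldl_nil, List.length_append, List.length_cons,
      List.length_nil]
    constructor
    · intro hk
      simp only [pvStep, List.mem_append, List.mem_filterMap] at hk
      rcases hk with ⟨j, hjS, hj⟩ | h1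
      · split_ifs at hj with hcond
        · obtain ⟨hjlen, hbj⟩ := hcond
          obtain rfl : k = j + 1 := (Option.some.inj hj).symm
          obtain ⟨hj1, hjn, hjb, heq⟩ := (ih j).mp hjS
          refine ⟨by omega, by omega, by omega, ?_⟩
          have hdrop : (a ++ [c]).drop (a.length + (0 + 1) - (j+1)) = a.drop (a.length - j) ++ [c] := by
            rw [List.drop_append_of_le_length (by omega)]
            congr 2; omega
          have htake : b.take (j+1) = b.take j ++ [b.getD j 0] := by
            rw [List.take_add_one]
            congr 1
            rw [List.getElem?_eq_getElem hjlen]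
            simp [List.getD, List.getElem?_eq_getElem hjlen]
          rw [hdrop, htake, heq, hbj]
      · split_ifs at h1 with hcond
        · obtain ⟨hb0, -⟩ := hcond
          simp only [List.mem_singleton] at h1
          subst h1
          refine ⟨le_refl 1, by omega, ?_, ?_⟩
          · cases b with | nil => exact absurd rfl hb | cons x xs => simp
          · have hdrop : (a ++ [c]).drop (a.length + (0 + 1) - 1) = [c] := by simp
            rw [hdrop]
            cases b with
            | nil => exact absurd rfl hb
            | cons x xs => simp at hb0 ⊢; omega
        · simp at h1
    · rintro ⟨hk1, hkn, hkb, heq⟩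
      simp only [pvStep, List.mem_append, List.mem_filterMap]
      rcases Nat.lt_or_ge 1 k with hk2 | hk2
      · -- k ≥ 2 : comes from extending the live length j = k-1
        left
        obtain ⟨j, rfl⟩ : ∃ j, k = j + 1 := ⟨k - 1, by omega⟩
        have hjlen : j < b.length := by omega
        have hja : j ≤ a.length := by omega
        have hdrop : (a ++ [c]).drop (a.length + (0 + 1) - (j+1)) = a.drop (a.length - j) ++ [c] := by
          rw [List.drop_append_of_le_length (by omega)]
          congr 2; omega
        have htake : b.take (j+1) = b.take j ++ [b.getD j 0] := by
          rw [List.take_add_one]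
          congr 1
          rw [List.getElem?_eq_getElem hjlen]
          simp [List.getD, List.getElem?_eq_getElem hjlen]
        rw [hdrop, htake] at heq
        have hlen : (a.drop (a.length - j)).length = (b.take j).length := by
          simp; omega
        have hparts := List.append_inj heq hlen
        have heq1 : a.drop (a.length - j) = b.take j := hparts.1
        have heqc : b.getD j 0 = c := by
          have h2 := hparts.2
          simp only [List.cons.injEq, and_true] at h2
          exact h2.symm
        exact ⟨j, (ih j).mpr ⟨by omega, hja, by omega, heq1⟩,
          by rw [if_pos ⟨hjlen, heqc⟩]⟩
      · -- k = 1 : the freshly started match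
        right
        have hk : k = 1 := by omega
        subst hk
        have hdrop : (a ++ [c]).drop (a.length + (0 + 1) - 1) = [c] := by simp
        rw [hdrop] at heq
        cases b with
        | nil => exact absurd rfl hb
        | cons x xs =>
          simp only [List.take_succ_cons, List.take_zero] at heq
          have hxc : x = c := by
            have := List.cons.inj heq.symm
            exact this.1
          rw [if_pos ⟨by simp [hxc], by simp⟩]
          simp

-- max(cands, default=0): the result is 0 or a member, and bounds every member
theorem maxD_nat_spec (L : List Nat) :
    (PySem.List.maxD L (fun k => k) 0 = 0 ∨ PySem.List.maxD L (fun k => k) 0 ∈ L) ∧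
    ∀ y ∈ L, y ≤ PySem.List.maxD L (fun k => k) 0 := by
  cases L with
  | nil => simp [PySem.List.maxD, PySem.List.max?]
  | cons x t =>
    have hm : PySem.List.maxD (x :: t) (fun k => k) 0 = t.foldl max x := by
      simp [PySem.List.maxD, PySem.List.max?_id_cons]
    rw [hm]
    refine ⟨?_, ?_⟩
    · right
      rcases PySem.List.foldl_max_mem t x with h | h
      · rw [h]; exact List.mem_cons_self
      · exact List.mem_cons_of_mem x h
    · intro y hy
      rcases List.mem_cons.mp hy with rfl | hy
      · exact (PySem.List.le_foldl_max t y).1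
      · exact (PySem.List.le_foldl_max t x).2 y hy

-- B's per-orientation overlap equals the greatest-index downward scan over A's slice condition
theorem pvOverlap_eq_descend (a b : List Int) :
    pvOverlap a b = pvDescend
      (fun i => PySem.List.slice a (some ((a.length : Int) - i)) none
                  == PySem.List.slice b none (some i))
      (min a.length b.length) := by
  by_cases hb : b = []
  · subst hb; simp [pvOverlap, pvDescend]
  · set cond : Int → Bool := fun i =>
      PySem.List.slice a (some ((a.length : Int) - i)) none
        == PySem.List.slice b none (some i) with hcond
    have hcondP : ∀ k : Nat, k ≤ a.length →
        (cond ((k : Nat) : Int) = true ↔ a.drop (a.length - k) = b.take k) := by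
      intro k hka
      have h1 : (a.length : Int) - (k : Int) = ((a.length - k : Nat) : Int) := by
        push_cast [Nat.cast_sub hka]; ring
      rw [hcond]
      simp only [h1, PySem.List.slice_from_natCast, PySem.List.slice_to_natCast, beq_iff_eq]
    set n := min a.length b.length with hn
    set g := pvDescend cond n with hg
    have hgle := pvDescend_le cond n
    rw [pvOverlap, if_neg hb]
    set m := PySem.List.maxD (a.foldl (pvStep b) []) (fun k => k) 0 with hm
    have hmem := mem_foldl_pvStep b hb a
    obtain ⟨hm0, hmub⟩ := maxD_nat_spec (a.foldl (pvStep b) [])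
    rw [← hm] at hm0 hmub
    have hmg : m ≤ g := by
      rcases hm0 with h0 | hmemm
      · omega
      · obtain ⟨h1, h2, h3, h4⟩ := (hmem m).mp hmemm
        exact le_pvDescend cond n m h1 (by omega) ((hcondP m h2).mpr h4)
    have hgm : g ≤ m := by
      rcases pvDescend_cond cond n with h0 | hc
      · rw [← hg] at h0; omega
      · rw [← hg] at hc
        by_cases hg0 : g = 0
        · omega
        · have hg1 : 1 ≤ g := by omega
          have hga : g ≤ a.length := by omega
          have hgb : g ≤ b.length := by omega
          exact hmub g ((hmem g).mpr ⟨hg1, hga, hgb, (hcondP g hga).mp hc⟩)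
    omega

theorem findOverlappingPair_eq (str1 str2 str : List Int) :
    findOverlappingPair str1 str2 str = findOverlappingPair_alt str1 str2 str := by
  simp only [findOverlappingPair, findOverlappingPair_alt]
  rw [pvOverlap_eq_descend str1 str2, pvOverlap_eq_descend str2 str1]
  have hmin : min (str1.length : Int) (str2.length : Int) = ((min str1.length str2.length : Nat) : Int) := by
    push_cast; rfl
  rw [hmin, Nat.min_comm str2.length str1.length,
    foldA_eq_descend (fun i =>
      PySem.List.slice str1 (some ((str1.length : Int) - i)) none == PySem.List.slice str2 none (some i))
      (min str1.length str2.length) (-1),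
    foldA_eq_descend (fun i =>
      PySem.List.slice str2 (some ((str2.length : Int) - i)) none == PySem.List.slice str1 none (some i))
      (min str1.length str2.length)]
  set d1 := pvDescend (fun i =>
      PySem.List.slice str1 (some ((str1.length : Int) - i)) none == PySem.List.slice str2 none (some i))
      (min str1.length str2.length) with hd1
  set d2 := pvDescend (fun i =>
      PySem.List.slice str2 (some ((str2.length : Int) - i)) none == PySem.List.slice str1 none (some i))
      (min str1.length str2.length) with hd2
  simp only [max_def]
  split_ifs <;> omega

-- ===== VERDICT (by name: the statement is the Claim_ definition above) =====
theorem findOverlappingPair_spec : Claim_equal_findOverlappingPair := by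
  intro str1 str2 str _
  unfold Spec_findOverlappingPair
  exact findOverlappingPair_eq str1 str2 str
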